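-- pv_equiv track=rewrite | github.com/ueser/beyond-pattern-matching | primitive-evolution/blog_demos/experiments/evolve_with_mined_motifs.py | _segments_symbols
-- ===== SOURCE A (Python) =====
-- from typing import Dict, List, Tuple, Any, Optional
--
-- def _segments_symbols(symbols: List[str]) -> List[List[str]]:
--     segs: List[List[str]] = []
--     i, n = 0, len(symbols)
--     while i < n:
--         if symbols[i] == '[':
--             depth, j = 1, i + 1
--             while j < n and depth:
--                 if symbols[j] == '[':
--                     depth += 1
--                 elif symbols[j] == ']':
--                     depth -= 1
--                 j += 1
--             segs.append(symbols[i:j])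
--             i = j
--         else:
--             j = i
--             while j < n and symbols[j] != '[':
--                 j += 1
--             segs.append(symbols[i:j])
--             i = j
--     return [s for s in segs if s]
-- ===== SOURCE B (Python) =====
-- from typing import List
--
-- def _segments_symbols(symbols: List[str]) -> List[List[str]]:
--     segs: List[List[str]] = []
--     cur: List[str] = []
--     depth = 0
--     for tok in symbols:
--         if depth == 0:
--             if tok == '[':
--                 if cur:
--                     segs.append(cur)
--                 cur = [tok]
--                 depth = 1
--             else:
--                 cur.append(tok)
--         else:
--             cur.append(tok)
--             if tok == '[':
--                 depth += 1
--             elif tok == ']':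
--                 depth -= 1
--                 if depth == 0:
--                     segs.append(cur)
--                     cur = []
--     if cur:
--         segs.append(cur)
--     return segs
-- ===== Notes on version B (the rewrite author's own statement) =====
-- stated objective: simpler
-- what changed: Replaced A's index-based outer/inner while loops with slicing by a single flat pass over the tokens that maintains a bracket depth counter and a current-segment accumulator, flushing segments as they complete (no final empty-segment filter needed).
import Mathlib
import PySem

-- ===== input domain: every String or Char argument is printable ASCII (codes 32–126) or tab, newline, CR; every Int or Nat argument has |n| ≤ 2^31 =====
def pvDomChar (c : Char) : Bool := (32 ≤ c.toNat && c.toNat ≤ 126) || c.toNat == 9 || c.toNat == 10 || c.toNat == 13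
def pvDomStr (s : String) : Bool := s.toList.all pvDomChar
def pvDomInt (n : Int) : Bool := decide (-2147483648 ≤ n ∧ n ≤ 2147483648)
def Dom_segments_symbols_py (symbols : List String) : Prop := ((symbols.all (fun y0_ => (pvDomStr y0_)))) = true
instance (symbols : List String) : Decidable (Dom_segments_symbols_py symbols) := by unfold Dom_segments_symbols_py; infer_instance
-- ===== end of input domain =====

-- B replaces A's nested index/slice while-loops by one flat pass with a depth counter and
-- a current-segment accumulator (objective: simpler).

-- ===== PORT A =====
-- inner while loop of the '[' branch: scan forward tracking depth, return the final j
def aInner (symbols : List String) (n depth j : Nat) : Nat :=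
  if _h : j < n ∧ depth ≠ 0 then
    aInner symbols n
      (if symbols.getD j "" = "[" then depth + 1
       else if symbols.getD j "" = "]" then depth - 1 else depth) (j + 1)
  else j
termination_by n - j
decreasing_by omega

-- inner while loop of the other branch: scan forward to the next '['
def aUnbr (symbols : List String) (n j : Nat) : Nat :=
  if _h : j < n ∧ symbols.getD j "" ≠ "[" then aUnbr symbols n (j + 1) else j
termination_by n - j
decreasing_by omega

-- termination facts the outer loop's recursion needs
theorem le_aInner (symbols : List String) (n depth j : Nat) : j ≤ aInner symbols n depth j := by
  unfold aInner
  split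
  · exact le_trans (Nat.le_succ j) (le_aInner symbols n _ (j + 1))
  · exact le_refl j
termination_by n - j
decreasing_by omega

theorem le_aUnbr (symbols : List String) (n j : Nat) : j ≤ aUnbr symbols n j := by
  unfold aUnbr
  split
  · exact le_trans (Nat.le_succ j) (le_aUnbr symbols n (j + 1))
  · exact le_refl j
termination_by n - j
decreasing_by omega

-- outer while loop of A
def aOuter (symbols : List String) (n i : Nat) : List (List String) :=
  if h : i < n then
    if hb : symbols.getD i "" = "[" then
      PySem.List.slice symbols (some (i : Int)) (some ((aInner symbols n 1 (i + 1)) : Int)) ::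
        aOuter symbols n (aInner symbols n 1 (i + 1))
    else
      PySem.List.slice symbols (some (i : Int)) (some ((aUnbr symbols n i) : Int)) ::
        aOuter symbols n (aUnbr symbols n i)
  else []
termination_by n - i
decreasing_by
  · have := le_aInner symbols n 1 (i + 1); omega
  · have h1 : i + 1 ≤ aUnbr symbols n i := by
      rw [aUnbr, dif_pos ⟨h, hb⟩]; exact le_aUnbr symbols n (i + 1)
    omega

def segments_symbols_py (symbols : List String) : List (List String) :=
  (aOuter symbols symbols.length 0).filter (fun s => !s.isEmpty)

-- ===== PORT B =====
-- one step of B's flat pass: state = (finished segments, current segment, bracket depth)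
def bStep (st : List (List String) × List String × Nat) (tok : String) :
    List (List String) × List String × Nat :=
  match st with
  | (segs, cur, depth) =>
    if depth = 0 then
      if tok = "[" then ((if cur.isEmpty then segs else segs ++ [cur]), [tok], 1)
      else (segs, cur ++ [tok], 0)
    else
      let cur' := cur ++ [tok]
      if tok = "[" then (segs, cur', depth + 1)
      else if tok = "]" then
        if depth - 1 = 0 then (segs ++ [cur'], [], 0) else (segs, cur', depth - 1)
      else (segs, cur', depth)

def segments_symbols_py_alt (symbols : List String) : List (List String) :=
  let st := symbols.foldl bStep ([], [], 0)
  if st.2.1.isEmpty then st.1 else st.1 ++ [st.2.1]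

-- ===== PRECONDITION & SPEC =====
def Spec_segments_symbols_py (symbols : List String) (out : List (List String)) : Prop := out = segments_symbols_py_alt symbols
instance (symbols : List String) (out : List (List String)) : Decidable (Spec_segments_symbols_py symbols out) := by unfold Spec_segments_symbols_py; infer_instance

-- ===== CLAIM (what is proved, stated in full; the proofs are below) =====
def Claim_equal_segments_symbols_py : Prop := ∀ (symbols : List String), Dom_segments_symbols_py symbols → Spec_segments_symbols_py symbols (segments_symbols_py symbols)

-- ===== LEMMAS AND PROOFS =====

-- reference decomposition: (tokens of a bracketed block given current depth, rest)
def takeBr : Nat → List String → List String × List String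
  | _, [] => ([], [])
  | d, x :: xs =>
    let d' := if x = "[" then d + 1 else if x = "]" then d - 1 else d
    if d' = 0 then ([x], xs)
    else
      let p := takeBr d' xs
      (x :: p.1, p.2)

theorem takeBr_append (d : Nat) (ts : List String) :
    (takeBr d ts).1 ++ (takeBr d ts).2 = ts := by
  induction ts generalizing d with
  | nil => simp [takeBr]
  | cons x xs ih =>
    simp only [takeBr]
    by_cases hz : (if x = "[" then d + 1 else if x = "]" then d - 1 else d) = 0
    · simp [hz]
    · simp [hz, ih]

theorem takeBr_snd_length_le (d : Nat) (ts : List String) :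
    (takeBr d ts).2.length ≤ ts.length := by
  have h := congrArg List.length (takeBr_append d ts)
  simp only [List.length_append] at h
  omega

-- reference segmentation
def segSpec : List String → List (List String)
  | [] => []
  | t :: ts =>
    if t = "[" then
      (t :: (takeBr 1 ts).1) :: segSpec (takeBr 1 ts).2
    else
      (t :: ts.takeWhile (· ≠ "[")) :: segSpec (ts.dropWhile (· ≠ "["))
termination_by ts => ts.length
decreasing_by
  · have := takeBr_snd_length_le 1 ts; simp; omega
  · have := List.length_dropWhile_le (p := fun x => decide (x ≠ "[")) (l := ts); simp at this ⊢; omega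

theorem segSpec_ne_nil (ts : List String) : ∀ s ∈ segSpec ts, s ≠ [] := by
  induction ts using segSpec.induct with
  | case1 => simp [segSpec]
  | case2 ts ih =>
    intro s hs
    rw [segSpec, if_pos rfl] at hs
    rcases List.mem_cons.mp hs with rfl | hmem
    · simp
    · exact ih s hmem
  | case3 t ts h ih =>
    intro s hs
    rw [segSpec, if_neg h] at hs
    rcases List.mem_cons.mp hs with rfl | hmem
    · simp
    · exact ih s hmem

-- ===== A-side characterization =====
theorem aInner_eq (symbols : List String) (d j : Nat) (hd : d ≠ 0) :
    aInner symbols symbols.length d j = j + (takeBr d (symbols.drop j)).1.length := by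
  rw [aInner]
  by_cases hj : j < symbols.length
  · rw [dif_pos ⟨hj, hd⟩]
    have hdrop : symbols.drop j = symbols[j] :: symbols.drop (j + 1) :=
      List.drop_eq_getElem_cons hj
    have hg : symbols.getD j "" = symbols[j] := List.getD_eq_getElem symbols "" hj
    rw [hdrop]
    simp only [takeBr, hg]
    set d' := if symbols[j] = "[" then d + 1 else if symbols[j] = "]" then d - 1 else d with hd'
    by_cases hz : d' = 0
    · rw [if_pos hz]
      rw [hz]
      rw [aInner]
      simp
    · rw [if_neg hz]
      rw [aInner_eq symbols d' (j + 1) hz]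
      simp only [List.length_cons]
      omega
  · rw [dif_neg (by omega)]
    have : symbols.drop j = [] := List.drop_eq_nil_of_le (by omega)
    simp [this, takeBr]
termination_by symbols.length - j
decreasing_by omega

theorem aUnbr_eq (symbols : List String) (j : Nat) :
    aUnbr symbols symbols.length j
      = j + ((symbols.drop j).takeWhile (· ≠ "[")).length := by
  rw [aUnbr]
  by_cases hj : j < symbols.length
  · have hdrop : symbols.drop j = symbols[j] :: symbols.drop (j + 1) :=
      List.drop_eq_getElem_cons hj
    have hg : symbols.getD j "" = symbols[j] := List.getD_eq_getElem symbols "" hj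
    by_cases hb : symbols[j] = "["
    · rw [dif_neg (fun hc => hc.2 (hg.trans hb))]
      rw [hdrop]
      simp [hb]
    · rw [dif_pos ⟨hj, fun hc => hb (hg.symm.trans hc)⟩]
      rw [aUnbr_eq symbols (j + 1), hdrop]
      simp only [List.takeWhile_cons]
      rw [if_pos (by simp [hb])]
      simp only [List.length_cons]
      omega
  · rw [dif_neg (by omega)]
    have : symbols.drop j = [] := List.drop_eq_nil_of_le (by omega)
    simp [this]
termination_by symbols.length - j
decreasing_by omega

theorem slice_pref (symbols : List String) (i : Nat) (pre rest : List String)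
    (hdrop : symbols.drop i = pre ++ rest) :
    PySem.List.slice symbols (some (i : Int)) (some ((i + pre.length : Nat) : Int)) = pre := by
  rw [PySem.List.slice_natCast]
  have : i + pre.length - i = pre.length := by omega
  rw [this, hdrop, List.take_left]

theorem aOuter_eq (symbols : List String) (i : Nat) :
    aOuter symbols symbols.length i = segSpec (symbols.drop i) := by
  rw [aOuter]
  by_cases hi : i < symbols.length
  · rw [dif_pos hi]
    have hdrop : symbols.drop i = symbols[i] :: symbols.drop (i + 1) :=
      List.drop_eq_getElem_cons hi
    have hg : symbols.getD i "" = symbols[i] := List.getD_eq_getElem symbols "" hi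
    by_cases hb : symbols[i] = "["
    · rw [dif_pos (hg.trans hb)]
      set s := (takeBr 1 (symbols.drop (i + 1))).1 with hs
      set r := (takeBr 1 (symbols.drop (i + 1))).2 with hr
      have hsr : s ++ r = symbols.drop (i + 1) := takeBr_append 1 _
      have hj : aInner symbols symbols.length 1 (i + 1) = (i + 1) + s.length :=
        aInner_eq symbols 1 (i + 1) (by omega)
      have hpre : symbols.drop i = (symbols[i] :: s) ++ r := by
        rw [hdrop, ← hsr]; simp
      have hslice : PySem.List.slice symbols (some (i : Int))
          (some ((aInner symbols symbols.length 1 (i + 1) : Nat) : Int)) = symbols[i] :: s := by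
        have : aInner symbols symbols.length 1 (i + 1) = i + (symbols[i] :: s).length := by
          simp only [List.length_cons]; omega
        rw [this]
        exact slice_pref symbols i _ r hpre
      have hdropj : symbols.drop (aInner symbols symbols.length 1 (i + 1)) = r := by
        rw [hj]
        have : symbols.drop (i + 1 + s.length) = (symbols.drop (i + 1)).drop s.length := by
          rw [List.drop_drop]
        rw [this, ← hsr, List.drop_left]
      rw [hslice, aOuter_eq symbols (aInner symbols symbols.length 1 (i + 1)), hdropj]
      rw [hdrop, segSpec, if_pos hb, ← hs, ← hr]
    · rw [dif_neg (fun hc => hb (hg.symm.trans hc))]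
      set run := ((symbols.drop (i + 1)).takeWhile (· ≠ "[")) with hrun
      set rest := ((symbols.drop (i + 1)).dropWhile (· ≠ "[")) with hrest
      have hsr : run ++ rest = symbols.drop (i + 1) := List.takeWhile_append_dropWhile
      have hj : aUnbr symbols symbols.length i = i + (symbols[i] :: run).length := by
        rw [aUnbr_eq symbols i, hdrop]
        simp only [List.takeWhile_cons]
        rw [if_pos (by simp [hb])]
      have hpre : symbols.drop i = (symbols[i] :: run) ++ rest := by
        rw [hdrop, ← hsr]; simp
      have hslice : PySem.List.slice symbols (some (i : Int))
          (some ((aUnbr symbols symbols.length i : Nat) : Int)) = symbols[i] :: run := by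
        rw [hj]; exact slice_pref symbols i _ rest hpre
      have hdropj : symbols.drop (aUnbr symbols symbols.length i) = rest := by
        rw [hj]
        have h2 : symbols.drop (i + (run.length + 1)) = (symbols.drop i).drop (run.length + 1) := by
          rw [List.drop_drop]
        simp only [List.length_cons]
        rw [h2, hpre]
        have : (symbols[i] :: run).length = run.length + 1 := by simp
        rw [← this, List.drop_left]
      rw [hslice, aOuter_eq symbols (aUnbr symbols symbols.length i), hdropj]
      rw [hdrop, segSpec, if_neg hb, ← hrun, ← hrest]
  · rw [dif_neg (by omega)]
    have : symbols.drop i = [] := List.drop_eq_nil_of_le (by omega)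
    rw [this, segSpec]
termination_by symbols.length - i
decreasing_by
  · have := le_aInner symbols symbols.length 1 (i + 1); omega
  · have h1 : i + 1 ≤ aUnbr symbols symbols.length i := by
      rw [aUnbr, dif_pos ⟨hi, fun hc => hb (hg.symm.trans hc)⟩]
      exact le_aUnbr symbols symbols.length (i + 1)
    omega

-- ===== B-side characterization =====
def bFinish (st : List (List String) × List String × Nat) : List (List String) :=
  if st.2.1.isEmpty then st.1 else st.1 ++ [st.2.1]

theorem bStep_depth (ts : List String) : ∀ (segs : List (List String)) (cur : List String) (d : Nat),
    d ≠ 0 → cur ≠ [] →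
    bFinish (ts.foldl bStep (segs, cur, d))
      = bFinish ((takeBr d ts).2.foldl bStep (segs ++ [cur ++ (takeBr d ts).1], [], 0)) := by
  induction ts with
  | nil =>
    intro segs cur d hd hc
    simp [takeBr, bFinish, hc]
  | cons x xs ih =>
    intro segs cur d hd hc
    simp only [List.foldl_cons, takeBr]
    set d' := if x = "[" then d + 1 else if x = "]" then d - 1 else d with hd'
    by_cases hz : d' = 0
    · rw [if_pos hz]
      have hx : x = "]" ∧ d = 1 := by
        by_cases h1 : x = "["
        · simp [h1] at hd'; omega
        · by_cases h2 : x = "]"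
          · refine ⟨h2, ?_⟩
            simp [h1, h2] at hd'; omega
          · simp [h1, h2] at hd'; exact absurd hd' (by omega)
      have heq : bStep (segs, cur, d) x = (segs ++ [cur ++ [x]], [], 0) := by
        simp [bStep, hx.1, hx.2]
      rw [heq]
    · rw [if_neg hz]
      have heq : bStep (segs, cur, d) x = (segs, cur ++ [x], d') := by
        by_cases h1 : x = "["
        · simp [bStep, hd, h1, hd']
        · by_cases h2 : x = "]"
          · have h3 : d - 1 ≠ 0 := by simp [h1, h2] at hd'; omega
            simp [bStep, hd, h1, h2, hd', h3]
          · simp [bStep, hd, h1, h2, hd']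
      rw [heq, ih segs (cur ++ [x]) d' hz (by simp)]
      simp

theorem bStep_run (ts : List String) : ∀ (segs : List (List String)) (cur : List String),
    ts.foldl bStep (segs, cur, 0)
      = (ts.dropWhile (· ≠ "[")).foldl bStep (segs, cur ++ ts.takeWhile (· ≠ "["), 0) := by
  induction ts with
  | nil => intro segs cur; simp
  | cons x xs ih =>
    intro segs cur
    by_cases hx : x = "["
    · simp [hx]
    · have heq : bStep (segs, cur, 0) x = (segs, cur ++ [x], 0) := by
        simp [bStep, hx]
      simp only [List.foldl_cons, List.takeWhile_cons, List.dropWhile_cons, hx,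
        decide_not, heq]
      
      rw [if_pos (by simp [hx]), if_pos (by simp [hx]), ih]
      simp

theorem bMain (ts : List String) : ∀ (segs : List (List String)),
    bFinish (ts.foldl bStep (segs, [], 0)) = segs ++ segSpec ts := by
  induction ts using segSpec.induct with
  | case1 => intro segs; simp [bFinish, segSpec]
  | case2 ts ih =>
    intro segs
    have heq : bStep (segs, [], 0) "[" = (segs, ["["], 1) := by
      simp [bStep]
    rw [List.foldl_cons, heq,
      bStep_depth ts segs ["["] 1 (by omega) (by simp),
      ih (segs ++ [["["] ++ (takeBr 1 ts).1])]
    rw [segSpec, if_pos rfl]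
    simp
  | case3 t ts h ih =>
    intro segs
    have heq : bStep (segs, [], 0) t = (segs, [t], 0) := by
      simp [bStep, h]
    rw [List.foldl_cons, heq, bStep_run ts segs [t]]
    rcases hrest : ts.dropWhile (· ≠ "[") with _ | ⟨y, r2⟩
    · rw [segSpec, if_neg h, ← hrest]
      rw [hrest]
      simp [bFinish, segSpec]
    · have hy : y = "[" := by
        have hh := List.head?_dropWhile_not (fun x => decide (x ≠ "[")) ts
        rw [hrest] at hh
        simp at hh
        exact hh
      have h1 : bStep (segs, [t] ++ ts.takeWhile (· ≠ "["), 0) y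
          = (segs ++ [[t] ++ ts.takeWhile (· ≠ "[")], [y], 1) := by
        simp [bStep, hy]
      have h2 : bStep (segs ++ [[t] ++ ts.takeWhile (· ≠ "[")], ([] : List String), 0) y
          = (segs ++ [[t] ++ ts.takeWhile (· ≠ "[")], [y], 1) := by
        simp [bStep, hy]
      rw [List.foldl_cons, h1, ← h2, ← List.foldl_cons, ← hrest,
        ih (segs ++ [[t] ++ ts.takeWhile (· ≠ "[")])]
      rw [segSpec, if_neg h]
      simp

-- ===== VERDICT (by name: the statement is the Claim_ definition above) =====
theorem segments_symbols_py_spec : Claim_equal_segments_symbols_py := by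
  intro symbols _
  unfold Spec_segments_symbols_py
  have hA : segments_symbols_py symbols = segSpec symbols := by
    unfold segments_symbols_py
    rw [aOuter_eq symbols 0]
    simp only [List.drop_zero]
    refine List.filter_eq_self.mpr ?_
    intro s hs
    simpa using segSpec_ne_nil symbols s hs
  have hB : segments_symbols_py_alt symbols = segSpec symbols := by
    have : segments_symbols_py_alt symbols
        = bFinish (symbols.foldl bStep ([], [], 0)) := rfl
    rw [this, bMain symbols []]
    simp
  rw [hA, hB]
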